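-- pv_equiv track=rewrite | github.com/SeunghyunSEO/seosh_speechbrain | speechbrain/decoders/seq2seq.py | filter_seq2seq_output
-- ===== SOURCE A (Python) =====
-- def filter_seq2seq_output(string_pred, eos_id=-1):
--     """Filter the output until the first eos occurs (exclusive).
--
--     Arguments
--     ---------
--     string_pred : list
--         A list containing the output strings/ints predicted by the seq2seq system.
--     eos_id : int, string
--         The id of the eos.
--
--     Returns
--     ------
--     list
--         The output predicted by seq2seq model.
--
--     Example
--     -------
--     >>> string_pred = ['a','b','c','d','eos','e']
--     >>> string_out = filter_seq2seq_output(string_pred, eos_id='eos')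
--     >>> string_out
--     ['a', 'b', 'c', 'd']
--     """
--     if isinstance(string_pred, list):
--         try:
--             eos_index = next(
--                 i for i, v in enumerate(string_pred) if v == eos_id
--             )
--         except StopIteration:
--             eos_index = len(string_pred)
--         string_out = string_pred[:eos_index]
--     else:
--         raise ValueError("The input must be a list.")
--     return string_out
-- ===== SOURCE B (Python) =====
-- def filter_seq2seq_output(string_pred, eos_id=-1):
--     """Filter the output until the first eos occurs (exclusive)."""
--     if isinstance(string_pred, list):
--         string_out = []
--         for v in string_pred:
--             if v == eos_id:
--                 break
--             string_out.append(v)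
--     else:
--         raise ValueError("The input must be a list.")
--     return string_out
-- ===== Notes on version B (the rewrite author's own statement) =====
-- stated objective: simpler
-- what changed: Replaced the enumerate/next index search plus slice with a single accumulating loop that appends elements and breaks at the first eos, never computing an index or slicing.
import Mathlib
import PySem

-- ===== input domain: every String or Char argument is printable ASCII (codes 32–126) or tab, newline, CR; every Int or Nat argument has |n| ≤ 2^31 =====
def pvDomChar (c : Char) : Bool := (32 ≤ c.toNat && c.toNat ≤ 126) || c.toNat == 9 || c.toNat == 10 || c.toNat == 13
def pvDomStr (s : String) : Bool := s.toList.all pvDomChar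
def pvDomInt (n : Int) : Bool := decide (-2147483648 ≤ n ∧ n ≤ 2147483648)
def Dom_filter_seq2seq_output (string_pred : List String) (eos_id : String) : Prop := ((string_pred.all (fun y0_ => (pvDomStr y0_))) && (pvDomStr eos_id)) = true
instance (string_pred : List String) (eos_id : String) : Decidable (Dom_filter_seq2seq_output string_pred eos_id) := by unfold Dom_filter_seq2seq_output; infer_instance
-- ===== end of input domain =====

-- B replaces A's enumerate/next index search + slice by a single accumulating loop that
-- breaks at the first eos (simpler decomposition; return value proved equal).

-- ===== PORT A =====
-- 'next(i for i, v in enumerate(string_pred) if v == eos_id)' with the StopIteration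
-- fallback 'eos_index = len(string_pred)': first matching index, else length.
def pvEosIndex (string_pred : List String) (eos_id : String) : Nat :=
  match string_pred with
  | [] => 0
  | v :: rest => if v == eos_id then 0 else 1 + pvEosIndex rest eos_id

def filter_seq2seq_output (string_pred : List String) (eos_id : String) : List String :=
  let eos_index := pvEosIndex string_pred eos_id
  -- string_pred[:eos_index]
  PySem.List.slice string_pred none (some (Int.ofNat eos_index))

-- ===== PORT B =====
def filter_seq2seq_output_alt (string_pred : List String) (eos_id : String) : List String :=
  match string_pred with
  | [] => []
  | v :: rest => if v == eos_id then [] else v :: filter_seq2seq_output_alt rest eos_id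

-- ===== PRECONDITION & SPEC =====
def Spec_filter_seq2seq_output (string_pred : List String) (eos_id : String) (out : List String) : Prop := out = filter_seq2seq_output_alt string_pred eos_id
instance (string_pred : List String) (eos_id : String) (out : List String) : Decidable (Spec_filter_seq2seq_output string_pred eos_id out) := by unfold Spec_filter_seq2seq_output; infer_instance

-- ===== CLAIM (what is proved, stated in full; the proofs are below) =====
def Claim_equal_filter_seq2seq_output : Prop := ∀ (string_pred : List String) (eos_id : String), Dom_filter_seq2seq_output string_pred eos_id → Spec_filter_seq2seq_output string_pred eos_id (filter_seq2seq_output string_pred eos_id)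

-- ===== LEMMAS AND PROOFS =====
theorem slice_eq_take (xs : List String) (n : Nat) :
    PySem.List.slice xs none (some (Int.ofNat n)) = xs.take n := by
  simpa using PySem.List.slice_to_natCast xs n

theorem a_eq_b (string_pred : List String) (eos_id : String) :
    filter_seq2seq_output string_pred eos_id = filter_seq2seq_output_alt string_pred eos_id := by
  rw [filter_seq2seq_output, slice_eq_take]
  induction string_pred with
  | nil => simp [pvEosIndex, filter_seq2seq_output_alt]
  | cons v rest ih =>
    by_cases h : v == eos_id
    · simp [pvEosIndex, filter_seq2seq_output_alt, h]
    · simp [pvEosIndex, filter_seq2seq_output_alt, h, Nat.add_comm, ih]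

-- ===== VERDICT (by name: the statement is the Claim_ definition above) =====
theorem filter_seq2seq_output_spec : Claim_equal_filter_seq2seq_output := by
  intro sp eos _
  exact a_eq_b sp eos
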